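-- pv_equiv track=rewrite | github.com/lucasdealexandri/masters-degree-codes | python/multipletBuilder.py | valid_charge_partitions
-- ===== SOURCE A (Python) =====
-- from typing import List, Set, Tuple, Dict
--
-- def valid_charge_partitions(charges: List[int]) -> Set[Tuple[Tuple[int]]]:
--     """
--     Returns all valid charge partitions given a list of charges
--     Example: charges = valid_charge_partitions([0, 0, 0, 1, 1])
--     returns {
--         ((0,), (0,), (0,), (1,), (1,)),
--         ((0,), (0,), (0, 1), (1,)),
--         ((0,), (0, 1), (0, 1))}
--     """
--     # In case they do not come sorted
--     charges = sorted(charges)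
--
--     partitions = set()
--     n = len(charges)
--
--     def backtrack(index: int, current_partition: List[List[int]]):
--
--         if index == n:
--             frozen_partition: Tuple[Tuple[int]] = tuple(sorted(tuple(chain) for chain in current_partition))
--
--             partitions.add(frozen_partition)
--
--             return
--
--         charge = charges[index]
--
--         for chain in current_partition:
--             if abs(chain[-1] - charge) == 1 and charge not in chain:
--
--                 chain.append(charge)
--                 backtrack(index + 1, current_partition)
--
--                 chain.pop()
--
--         current_partition.append([charge])
--
--         backtrack(index + 1, current_partition)
--
--         current_partition.pop()
--
--     backtrack(0, [])
--
--     return partitions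
-- ===== SOURCE B (Python) =====
-- def valid_charge_partitions(charges):
--     """
--     Iterative generation-by-generation rebuild: instead of recursive
--     backtracking with in-place mutation, keep a list of partial partitions
--     (tuples of chains) and expand every one of them with each charge in turn;
--     canonicalize with tuple(sorted(...)) only at the end.
--     """
--     charges = sorted(charges)
--     states = [()]
--     for c in charges:
--         nxt = []
--         for p in states:
--             for i, chain in enumerate(p):
--                 if abs(chain[-1] - c) == 1 and c not in chain:
--                     nxt.append(p[:i] + (chain + (c,),) + p[i + 1:])
--             nxt.append(p + ((c,),))
--         states = nxt
--     return {tuple(sorted(p)) for p in states}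
-- ===== Notes on version B (the rewrite author's own statement) =====
-- stated objective: alternative
-- what changed: Replaces recursive backtracking with in-place append/pop mutation of a shared partition by an iterative generation-by-generation expansion of a list of immutable partial partitions, canonicalizing only at the end.
import Mathlib
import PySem

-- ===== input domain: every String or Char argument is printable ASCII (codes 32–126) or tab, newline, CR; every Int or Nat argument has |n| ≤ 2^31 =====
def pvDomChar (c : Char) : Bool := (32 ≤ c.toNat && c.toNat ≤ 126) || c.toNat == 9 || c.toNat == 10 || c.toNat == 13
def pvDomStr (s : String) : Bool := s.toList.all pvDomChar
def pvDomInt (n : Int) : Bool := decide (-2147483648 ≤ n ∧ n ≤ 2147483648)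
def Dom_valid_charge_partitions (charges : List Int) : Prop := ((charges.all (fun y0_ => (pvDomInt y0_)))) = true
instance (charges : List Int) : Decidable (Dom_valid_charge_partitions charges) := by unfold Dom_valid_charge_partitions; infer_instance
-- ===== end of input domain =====

-- B replaces A's recursive backtracking (in-place append/pop on a shared partition) by an
-- iterative generation-by-generation expansion of a list of partial partitions; objective: alternative.

-- shared helper: the placement test 'abs(chain[-1] - charge) == 1 and charge not in chain'
-- (chains are always nonempty in both programs; pyGet? chain (-1) is chain[-1] exactly)
def pvAdjOk (c : Int) (chain : List Int) : Bool :=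
  ((PySem.List.pyGet? chain (-1)).elim false (fun last => (last - c).natAbs == 1)) && !(chain.contains c)

-- shared helper: tuple(sorted(tuple(chain) for chain in partition))
def pvCanon (p : List (List Int)) : List (List Int) :=
  PySem.List.sorted p (fun chain => chain) false

-- ===== PORT A =====
-- backtrack(index, current_partition) with the mutable outer set 'partitions' threaded as an
-- accumulator; the in-place chain.append/ backtrack / chain.pop becomes recursion on the copy
-- with chain i extended, iterated over the chain positions.
def pvBacktrack : List Int → List (List Int) → PySem.Set (List (List Int)) → PySem.Set (List (List Int))
  | [], cur, parts => PySem.Set.add parts (pvCanon cur)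
  | c :: rest, cur, parts =>
      let parts1 := (List.range cur.length).foldl
        (fun acc i =>
          let chain := cur.getD i []
          if pvAdjOk c chain then pvBacktrack rest (cur.set i (chain ++ [c])) acc else acc)
        parts
      pvBacktrack rest (cur ++ [[c]]) parts1
  termination_by cs _ _ => cs.length

def valid_charge_partitions (charges : List Int) : List (List (List Int)) :=
  pvBacktrack (PySem.List.sorted charges (fun x => x) false) [] PySem.Set.empty

-- ===== PORT B =====
-- one generation step: all ways to place charge c into partial partition p
def pvExpand (c : Int) (p : List (List Int)) : List (List (List Int)) :=
  ((List.range p.length).filterMap (fun i =>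
      let chain := p.getD i []
      if pvAdjOk c chain then some (p.set i (chain ++ [c])) else none))
  ++ [p ++ [[c]]]

def valid_charge_partitions_alt (charges : List Int) : List (List (List Int)) :=
  PySem.Set.ofList
    (((PySem.List.sorted charges (fun x => x) false).foldl
        (fun ss c => ss.flatMap (pvExpand c)) [[]]).map pvCanon)

-- ===== PRECONDITION & SPEC =====
def Spec_valid_charge_partitions (charges : List Int) (out : List (List (List Int))) : Prop := out = valid_charge_partitions_alt charges
instance (charges : List Int) (out : List (List (List Int))) : Decidable (Spec_valid_charge_partitions charges out) := by unfold Spec_valid_charge_partitions; infer_instance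

-- ===== CLAIM (what is proved, stated in full; the proofs are below) =====
def Claim_equal_valid_charge_partitions : Prop := ∀ (charges : List Int), Dom_valid_charge_partitions charges → Spec_valid_charge_partitions charges (valid_charge_partitions charges)

-- ===== LEMMAS AND PROOFS =====

-- proof-only helper: the DFS leaf sequence of A, phrased with B's expansion step
def pvLeaves : List Int → List (List Int) → List (List (List Int))
  | [] => fun p => [pvCanon p]
  | c :: rest => fun p => (pvExpand c p).flatMap (pvLeaves rest)

lemma pvBacktrack_eq_leaves (cs : List Int) :
    ∀ (p : List (List Int)) (acc : PySem.Set (List (List Int))),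
    pvBacktrack cs p acc = (pvLeaves cs p).foldl PySem.Set.add acc := by
  induction cs with
  | nil => intro p acc; simp [pvBacktrack, pvLeaves]
  | cons c rest ih =>
    intro p acc
    have haux : ∀ (l : List Nat) (a : PySem.Set (List (List Int))),
        l.foldl (fun acc i =>
          let chain := p.getD i []
          if pvAdjOk c chain then pvBacktrack rest (p.set i (chain ++ [c])) acc else acc) a
        = ((l.filterMap (fun i =>
              let chain := p.getD i []
              if pvAdjOk c chain then some (p.set i (chain ++ [c])) else none)).flatMap
            (pvLeaves rest)).foldl PySem.Set.add a := by
      intro l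
      induction l with
      | nil => intro a; simp
      | cons i l ihl =>
        intro a
        by_cases h : pvAdjOk c (p.getD i []) = true
        · simp only [List.foldl_cons, List.filterMap_cons, h, if_pos]
          rw [ihl, ih, List.flatMap_cons, List.foldl_append]
        · have h' : pvAdjOk c (p.getD i []) = false := by simpa using h
          simp only [List.foldl_cons, List.filterMap_cons, h', if_false, Bool.false_eq_true]
          rw [ihl]
    rw [pvBacktrack]
    rw [haux, ih]
    show _ = ((pvExpand c p).flatMap (pvLeaves rest)).foldl _ acc
    rw [pvExpand, List.flatMap_append, List.foldl_append]
    simp [List.flatMap_cons]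

lemma pvStates_map_canon (cs : List Int) :
    ∀ (ss : List (List (List Int))),
    ((cs.foldl (fun ss c => ss.flatMap (pvExpand c)) ss).map pvCanon) = ss.flatMap (pvLeaves cs) := by
  induction cs with
  | nil => intro ss; simp only [List.foldl_nil, pvLeaves]; exact List.map_eq_flatMap
  | cons c rest ih =>
    intro ss
    rw [List.foldl_cons, ih, List.flatMap_assoc]
    rfl

-- ===== VERDICT (by name: the statement is the Claim_ definition above) =====
theorem valid_charge_partitions_spec : Claim_equal_valid_charge_partitions := by
  intro charges _
  unfold Spec_valid_charge_partitions valid_charge_partitions valid_charge_partitions_alt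
  rw [pvBacktrack_eq_leaves, pvStates_map_canon]
  simp [PySem.Set.ofList_eq_foldl, PySem.Set.empty]
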